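-- pv_equiv track=rewrite | github.com/Splawik/pytigon-lib | pytigon_lib/schdjangoext/fastform.py | _scan_lines
-- ===== SOURCE A (Python) =====
-- def _scan_lines(input_str):
--     """Split input into logical lines, joining multi-line choice lists.
--
--     Lines containing ``:[`` without a closing ``]`` are continued
--     on the following line(s).
--
--     Args:
--         input_str: The raw input string.
--
--     Returns:
--         List of logical lines.
--     """
--     lines = input_str.replace("\r", "").split("\n")
--     result = []
--     append_to_last = False
--
--     for line in lines:
--         if append_to_last:
--             result[-1] = result[-1] + ";" + line
--             if "]" in line:
--                 append_to_last = False
--         else: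
--             result.append(line)
--             if ":[" in line and "]" not in line:
--                 append_to_last = True
--     return result
-- ===== SOURCE B (Python) =====
-- def _scan_lines(input_str):
--     """Split input into logical lines, joining multi-line choice lists.
--
--     Re-implementation: traverses the lines BACK-TO-FRONT, building the output
--     right-to-left.  When a group-opening line (contains ":[" but no "]") is
--     met, the logical lines already built to its right are merged back into it
--     up to and including the first one containing "]".  This is correct because
--     a group's continuation always extends to the first following raw line with
--     "]", and a previously built logical line contains "]" exactly when one of
--     its raw lines does.
--     """
--     lines = input_str.replace("\r", "").split("\n")
--     result = []
--     for line in reversed(lines):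
--         if ":[" in line and "]" not in line:
--             cur = line
--             while result:
--                 nxt = result.pop(0)
--                 cur = cur + ";" + nxt
--                 if "]" in nxt:
--                     break
--             result.insert(0, cur)
--         else:
--             result.insert(0, line)
--     return result
-- ===== Notes on version B (the rewrite author's own statement) =====
-- stated objective: alternative
-- what changed: Replaces A's forward flag-driven pass that mutates result[-1] with a back-to-front traversal: iterating the lines in reverse, a group-opening line merges the already-built logical lines to its right up to the first one containing ']', so the output is built right-to-left.
import Mathlib
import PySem

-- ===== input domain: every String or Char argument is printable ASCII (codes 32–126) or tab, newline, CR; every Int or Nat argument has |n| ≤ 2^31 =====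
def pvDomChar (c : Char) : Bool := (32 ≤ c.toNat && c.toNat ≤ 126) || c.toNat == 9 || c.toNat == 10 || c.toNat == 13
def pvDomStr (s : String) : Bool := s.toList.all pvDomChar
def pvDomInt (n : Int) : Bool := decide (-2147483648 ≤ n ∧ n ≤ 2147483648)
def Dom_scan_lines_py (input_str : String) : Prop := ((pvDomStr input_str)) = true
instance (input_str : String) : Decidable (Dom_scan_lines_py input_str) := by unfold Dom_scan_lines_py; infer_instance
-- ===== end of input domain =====

-- B builds the output BACK-TO-FRONT (a fold from the right), merging already-built
-- logical lines into a group opener, instead of A's forward flag-driven pass that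
-- mutates result[-1]; same O(n) cost, different traversal order (objective: alternative).


-- ===== PORT A =====
-- the body of A's for-loop over (result, append_to_last); result[-1] is only read when
-- append_to_last = true, where result is provably nonempty (getLast?.getD "" is then exact)
def pvStepA (st : List String × Bool) (line : String) : List String × Bool :=
  if st.2 then
    (st.1.dropLast ++ [(st.1.getLast?.getD "") ++ ";" ++ line],
     if PySem.Str.isIn "]" line then false else st.2)
  else
    (st.1 ++ [line],
     if PySem.Str.isIn ":[" line && !(PySem.Str.isIn "]" line) then true else st.2)

def scan_lines_py (input_str : String) : List String :=
  let lines := (PySem.Str.split? (PySem.Str.replace input_str "\r" "") "\n").getD []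
  (lines.foldl pvStepA ([], false)).1

-- ===== PORT B =====
-- B's inner while: pop already-built logical lines off the front of the result,
-- joining them onto cur, until one containing "]" has been absorbed (or it is empty)
def pvMergeB (cur : String) : List String → String × List String
  | [] => (cur, [])
  | nxt :: rest =>
    if PySem.Str.isIn "]" nxt then (cur ++ ";" ++ nxt, rest)
    else pvMergeB (cur ++ ";" ++ nxt) rest

-- B's loop body: 'for line in reversed(lines)' prepending to result = a right fold
def pvStepB (line : String) (res : List String) : List String :=
  if PySem.Str.isIn ":[" line && !(PySem.Str.isIn "]" line) then
    (pvMergeB line res).1 :: (pvMergeB line res).2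
  else line :: res

def scan_lines_py_alt (input_str : String) : List String :=
  ((PySem.Str.split? (PySem.Str.replace input_str "\r" "") "\n").getD []).foldr pvStepB []

-- ===== PRECONDITION & SPEC =====
def Spec_scan_lines_py (input_str : String) (out : List String) : Prop := out = scan_lines_py_alt input_str
instance (input_str : String) (out : List String) : Decidable (Spec_scan_lines_py input_str out) := by unfold Spec_scan_lines_py; infer_instance

-- ===== CLAIM (what is proved, stated in full; the proofs are below) =====
def Claim_equal_scan_lines_py : Prop := ∀ (input_str : String), Dom_scan_lines_py input_str → Spec_scan_lines_py input_str (scan_lines_py input_str)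

-- ===== LEMMAS AND PROOFS =====

-- proof-side canonical form: consume continuation lines of a group opener
def pvConsume (cur : String) : List String → String × List String
  | [] => (cur, [])
  | l :: rest =>
    if PySem.Str.isIn "]" l then (cur ++ ";" ++ l, rest)
    else pvConsume (cur ++ ";" ++ l) rest

theorem pvConsume_length_le (cur : String) (ls : List String) :
    (pvConsume cur ls).2.length ≤ ls.length := by
  induction ls generalizing cur with
  | nil => simp [pvConsume]
  | cons l rest ih =>
    simp only [pvConsume]
    split
    · simp
    · exact Nat.le_succ_of_le (ih _)

-- proof-side canonical form of the whole scan (nested consumption)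
def pvGo : List String → List String
  | [] => []
  | l :: rest =>
    if PySem.Str.isIn ":[" l && !(PySem.Str.isIn "]" l) then
      (pvConsume l rest).1 :: pvGo (pvConsume l rest).2
    else l :: pvGo rest
termination_by ls => ls.length
decreasing_by
  · exact Nat.lt_succ_of_le (pvConsume_length_le l rest)
  · simp

theorem pvGo_nil : pvGo [] = [] := by rw [pvGo]

theorem isIn_single (c : Char) (l : List Char) : PySem.Chars.isIn [c] l = l.contains c := by
  rw [Bool.eq_iff_iff, PySem.Chars.isIn_iff_infix, List.contains_iff_mem]
  constructor
  · intro h; exact h.mem (by simp)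
  · intro h
    obtain ⟨s, t, rfl⟩ := List.append_of_mem h
    exact ⟨s, t, by simp⟩

theorem pvIsIn_rbr_append (a b : String) :
    PySem.Str.isIn "]" (a ++ ";" ++ b) = (PySem.Str.isIn "]" a || PySem.Str.isIn "]" b) := by
  have h1 : "]".toList = [']'] := rfl
  have h2 : ";".toList = [';'] := rfl
  simp only [PySem.Str.isIn_eq, String.toList_append, h1, h2]
  rw [isIn_single, isIn_single, isIn_single, Bool.eq_iff_iff]
  simp

theorem pvConsume_prepend (a b : String) (t : List String) :
    pvConsume (a ++ ";" ++ b) t = (a ++ ";" ++ (pvConsume b t).1, (pvConsume b t).2) := by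
  induction t generalizing b with
  | nil => simp [pvConsume]
  | cons l rest ih =>
    simp only [pvConsume]
    by_cases hl : PySem.Str.isIn "]" l = true
    · rw [if_pos hl, if_pos hl]
      simp [String.append_assoc]
    · rw [if_neg hl, if_neg hl]
      have hx : a ++ ";" ++ b ++ ";" ++ l = a ++ ";" ++ (b ++ ";" ++ l) := by
        simp only [String.append_assoc]
      rw [hx]
      exact ih (b ++ ";" ++ l)

theorem pvConsume_no_rbr (cur : String) (t : List String)
    (h : PySem.Str.isIn "]" ((pvConsume cur t).1) = false) : (pvConsume cur t).2 = [] := by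
  induction t generalizing cur with
  | nil => simp [pvConsume]
  | cons l rest ih =>
    simp only [pvConsume] at h ⊢
    by_cases hl : PySem.Str.isIn "]" l = true
    · rw [if_pos hl] at h
      rw [pvIsIn_rbr_append, hl] at h
      simp at h
    · rw [if_neg hl] at h ⊢
      exact ih _ h

theorem pvMergeB_pvGo (n : Nat) : ∀ (t : List String), t.length ≤ n → ∀ (cur : String),
    pvMergeB cur (pvGo t) = ((pvConsume cur t).1, pvGo (pvConsume cur t).2) := by
  induction n with
  | zero =>
    intro t ht cur
    have : t = [] := List.eq_nil_of_length_eq_zero (Nat.le_zero.mp ht)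
    subst this
    simp [pvGo_nil, pvMergeB, pvConsume]
  | succ n ih =>
    intro t ht cur
    cases t with
    | nil => simp [pvGo_nil, pvMergeB, pvConsume]
    | cons r rest =>
      have hrest : rest.length ≤ n := by simp only [List.length_cons] at ht; omega
      by_cases hs : (PySem.Str.isIn ":[" r && !(PySem.Str.isIn "]" r)) = true
      · have hr : PySem.Str.isIn "]" r = false := by
          rcases Bool.and_eq_true .. |>.mp hs with ⟨_, h2⟩
          simpa using h2
        have hrn : ¬ PySem.Str.isIn "]" r = true := by
          simp only [hr]; exact Bool.false_ne_true
        rw [pvGo, if_pos hs]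
        simp only [pvConsume]
        rw [if_neg hrn, pvConsume_prepend]
        by_cases hC : PySem.Str.isIn "]" ((pvConsume r rest).1) = true
        · rw [pvMergeB, if_pos hC]
        · have h2 : (pvConsume r rest).2 = [] :=
            pvConsume_no_rbr r rest (by simpa using hC)
          rw [pvMergeB, if_neg hC, h2, pvGo_nil, pvMergeB]
      · rw [pvGo, if_neg hs]
        simp only [pvConsume]
        by_cases hl : PySem.Str.isIn "]" r = true
        · rw [if_pos hl, pvMergeB, if_pos hl]
        · rw [if_neg hl, pvMergeB, if_neg hl]
          exact ih rest hrest (cur ++ ";" ++ r)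

theorem pvFoldr_eq_pvGo (n : Nat) : ∀ (ls : List String), ls.length ≤ n →
    ls.foldr pvStepB [] = pvGo ls := by
  induction n with
  | zero =>
    intro ls hls
    have : ls = [] := List.eq_nil_of_length_eq_zero (Nat.le_zero.mp hls)
    subst this; simp [pvGo_nil]
  | succ n ih =>
    intro ls hls
    cases ls with
    | nil => simp [pvGo_nil]
    | cons l rest =>
      have hrest : rest.length ≤ n := by simp only [List.length_cons] at hls; omega
      rw [List.foldr_cons, ih rest hrest, pvStepB, pvGo]
      by_cases hs : (PySem.Str.isIn ":[" l && !(PySem.Str.isIn "]" l)) = true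
      · rw [if_pos hs, if_pos hs, pvMergeB_pvGo rest.length rest (Nat.le_refl _) l]
      · rw [if_neg hs, if_neg hs]

-- joint invariant for A's fold: with the flag down it appends pvGo of the rest; with the
-- flag up (last pushed element cur) it appends the consumed group then pvGo of what remains
theorem pvFold_inv (n : Nat) : ∀ (ls : List String), ls.length ≤ n →
    (∀ res : List String, (ls.foldl pvStepA (res, false)).1 = res ++ pvGo ls) ∧
    (∀ (res : List String) (cur : String),
      (ls.foldl pvStepA (res ++ [cur], true)).1 =
        res ++ (pvConsume cur ls).1 :: pvGo (pvConsume cur ls).2) := by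
  induction n with
  | zero =>
    intro ls hls
    have : ls = [] := List.eq_nil_of_length_eq_zero (Nat.le_zero.mp hls)
    subst this
    constructor
    · intro res; simp [pvGo_nil]
    · intro res cur; simp [pvConsume, pvGo_nil]
  | succ n ih =>
    intro ls hls
    cases ls with
    | nil =>
      constructor
      · intro res; simp [pvGo_nil]
      · intro res cur; simp [pvConsume, pvGo_nil]
    | cons l rest =>
      have hrest : rest.length ≤ n := Nat.lt_succ_iff.mp (by simpa using hls)
      constructor
      · intro res
        simp only [List.foldl_cons, pvStepA]
        by_cases hc : (PySem.Str.isIn ":[" l && !(PySem.Str.isIn "]" l)) = true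
        · rw [if_neg (by simp), if_pos hc]
          have := ((ih rest hrest).2) res l
          rw [this, pvGo, if_pos hc]
        · rw [if_neg (by simp), if_neg hc]
          have := ((ih rest hrest).1) (res ++ [l])
          rw [this, pvGo, if_neg hc, List.append_assoc]
          rfl
      · intro res cur
        simp only [List.foldl_cons, pvStepA]
        rw [if_pos (by trivial)]
        simp only [List.dropLast_concat, List.getLast?_concat, Option.getD_some]
        by_cases hb : PySem.Str.isIn "]" l = true
        · rw [if_pos hb]
          have := ((ih rest hrest).1) (res ++ [cur ++ ";" ++ l])
          rw [this, pvConsume, if_pos hb, List.append_assoc]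
          rfl
        · rw [if_neg hb]
          have := ((ih rest hrest).2) res (cur ++ ";" ++ l)
          rw [this, pvConsume, if_neg hb]

-- ===== VERDICT (by name: the statement is the Claim_ definition above) =====
theorem scan_lines_py_spec : Claim_equal_scan_lines_py := by
  intro input_str _
  unfold Spec_scan_lines_py scan_lines_py scan_lines_py_alt
  set ls := (PySem.Str.split? (PySem.Str.replace input_str "\r" "") "\n").getD [] with hls
  have hA := (pvFold_inv ls.length ls (le_refl _)).1 []
  have hB := pvFoldr_eq_pvGo ls.length ls (le_refl _)
  simp only [List.nil_append] at hA
  rw [hA, hB]
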